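-- pv_equiv track=rewrite | github.com/ajboyd2/vae_mpp | vae_mpp/evaluate.py | _gamma_post
-- ===== SOURCE A (Python) =====
-- from collections import defaultdict
--
-- def _gamma_post(obs, alpha, beta):
--     counts = defaultdict(int)
--     alpha, beta = alpha.copy(), beta.copy()
--     for mark in obs["ref_marks"]:
--         counts[mark] += 1
--     for k in alpha.keys():
--         alpha[k] += counts[k]
--         beta[k] += 1
--     return alpha, beta
-- ===== SOURCE B (Python) =====
-- def _gamma_post(obs, alpha, beta):
--     alpha, beta = alpha.copy(), beta.copy()
--     for k in alpha:
--         beta[k] += 1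
--     for mark in obs["ref_marks"]:
--         if mark in alpha:
--             alpha[mark] += 1
--     return alpha, beta
-- ===== Notes on version B (the rewrite author's own statement) =====
-- stated objective: simpler
-- what changed: B drops the intermediate defaultdict count table: it first bumps beta once per alpha key, then iterates the observed marks directly, incrementing the copied alpha in place for marks present in it; no counts dict is ever built.
import Mathlib
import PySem

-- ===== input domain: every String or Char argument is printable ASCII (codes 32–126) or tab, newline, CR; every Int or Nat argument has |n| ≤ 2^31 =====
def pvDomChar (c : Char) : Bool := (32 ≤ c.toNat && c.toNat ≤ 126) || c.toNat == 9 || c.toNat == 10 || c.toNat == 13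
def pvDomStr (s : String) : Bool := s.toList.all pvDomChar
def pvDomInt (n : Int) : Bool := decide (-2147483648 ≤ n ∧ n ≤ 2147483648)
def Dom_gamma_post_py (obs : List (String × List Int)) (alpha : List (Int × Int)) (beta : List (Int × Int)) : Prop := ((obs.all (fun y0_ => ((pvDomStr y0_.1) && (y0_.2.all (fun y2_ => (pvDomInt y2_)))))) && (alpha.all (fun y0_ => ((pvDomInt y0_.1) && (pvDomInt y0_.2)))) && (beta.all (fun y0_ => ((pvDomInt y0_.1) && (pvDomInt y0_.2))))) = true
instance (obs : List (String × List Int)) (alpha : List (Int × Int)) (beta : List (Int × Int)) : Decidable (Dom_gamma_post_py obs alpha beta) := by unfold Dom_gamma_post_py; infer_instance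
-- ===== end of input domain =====

-- B drops the intermediate defaultdict count table and accumulates the observed marks
-- directly into the copied alpha (objective: simpler). Return-value equivalence only;
-- neither version mutates its arguments (both copy).

-- ===== PORT A =====
-- counts = defaultdict(int); for mark in obs["ref_marks"]: counts[mark] += 1
-- for k in alpha: alpha[k] += counts[k]; beta[k] += 1   (beta[k] exists on Pre_, so
-- modify with default 0 is exact there; obs["ref_marks"] exists on Pre_, so getD is exact)
def gamma_post_py (obs : List (String × List Int)) (alpha : List (Int × Int)) (beta : List (Int × Int)) : (List (Int × Int)) × (List (Int × Int)) :=
  let marks : List Int := (PySem.Dict.mk obs).getD "ref_marks" []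
  let counts : PySem.Dict Int Int := marks.foldl (fun d m => d.modify m 0 (· + 1)) PySem.Dict.empty
  let a0 : PySem.Dict Int Int := PySem.Dict.mk alpha
  let b0 : PySem.Dict Int Int := PySem.Dict.mk beta
  let p := a0.keys.foldl (fun (p : PySem.Dict Int Int × PySem.Dict Int Int) k =>
      (p.1.modify k 0 (· + counts.getD k 0), p.2.modify k 0 (· + 1))) (a0, b0)
  (p.1.items, p.2.items)

-- ===== PORT B =====
-- alpha, beta = copies; for k in alpha: beta[k] += 1;
-- for mark in obs["ref_marks"]: if mark in alpha: alpha[mark] += 1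
def gamma_post_py_alt (obs : List (String × List Int)) (alpha : List (Int × Int)) (beta : List (Int × Int)) : (List (Int × Int)) × (List (Int × Int)) :=
  let a0 : PySem.Dict Int Int := PySem.Dict.mk alpha
  let b0 : PySem.Dict Int Int := PySem.Dict.mk beta
  let b1 := a0.keys.foldl (fun d k => d.modify k 0 (· + 1)) b0
  let marks : List Int := (PySem.Dict.mk obs).getD "ref_marks" []
  let a1 := marks.foldl (fun d m => if d.contains m then d.modify m 0 (· + 1) else d) a0
  (a1.items, b1.items)

-- ===== PRECONDITION & SPEC =====
-- Pre_ excludes the inputs where A raises KeyError (no "ref_marks" entry in obs, or an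
-- alpha key absent from beta) and association lists whose alpha keys repeat: such lists
-- do not denote a Python dict, so any first-match behaviour on them is accidental.
def Pre_gamma_post_py (obs : List (String × List Int)) (alpha : List (Int × Int)) (beta : List (Int × Int)) : Prop :=
  "ref_marks" ∈ obs.map (·.1) ∧ (∀ k ∈ alpha.map (·.1), k ∈ beta.map (·.1)) ∧ (alpha.map (·.1)).Nodup
instance (obs : List (String × List Int)) (alpha : List (Int × Int)) (beta : List (Int × Int)) : Decidable (Pre_gamma_post_py obs alpha beta) := by unfold Pre_gamma_post_py; infer_instance

def pvWitness_gamma_post_py : (List (String × List Int)) × (List (Int × Int)) × (List (Int × Int)) :=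
  ([("ref_marks", [1, 2, 1])], [(1, 3), (2, 0)], [(1, 1), (2, 2), (5, 0)])

def Spec_gamma_post_py (obs : List (String × List Int)) (alpha : List (Int × Int)) (beta : List (Int × Int)) (out : (List (Int × Int)) × (List (Int × Int))) : Prop := out = gamma_post_py_alt obs alpha beta
instance (obs : List (String × List Int)) (alpha : List (Int × Int)) (beta : List (Int × Int)) (out : (List (Int × Int)) × (List (Int × Int))) : Decidable (Spec_gamma_post_py obs alpha beta out) := by unfold Spec_gamma_post_py; infer_instance

-- ===== CLAIM (what is proved, stated in full; the proofs are below) =====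
def Claim_equal_gamma_post_py : Prop := ∀ (obs : List (String × List Int)) (alpha : List (Int × Int)) (beta : List (Int × Int)), Dom_gamma_post_py obs alpha beta → Pre_gamma_post_py obs alpha beta → Spec_gamma_post_py obs alpha beta (gamma_post_py obs alpha beta)

-- ===== LEMMAS AND PROOFS =====

-- A's pair fold splits into its two independent component folds.
theorem pv_foldl_prod_split {α β γ : Type} (l : List γ) (f : α → γ → α) (g : β → γ → β) (a : α) (b : β) :
    l.foldl (fun p k => (f p.1 k, g p.2 k)) (a, b) = (l.foldl f a, l.foldl g b) := by
  induction l generalizing a b with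
  | nil => rfl
  | cons x xs ih => simpa using ih (f a x) (g b x)

-- A's alpha loop: modify once per key of a duplicate-free list.
theorem pv_getD_foldl_modify_nodup (l : List Int) (c : Int → Int) (d : PySem.Dict Int Int)
    (hnd : l.Nodup) (j : Int) :
    (l.foldl (fun d k => d.modify k 0 (· + c k)) d).getD j 0
      = d.getD j 0 + (if j ∈ l then c j else 0) := by
  induction l generalizing d with
  | nil => simp
  | cons x xs ih =>
    simp only [List.nodup_cons] at hnd
    simp only [List.foldl_cons, ih _ hnd.2, PySem.Dict.getD_modify, List.mem_cons]
    by_cases hj : j = x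
    · subst hj
      simp [hnd.1]
    · simp [hj]

theorem pv_keys_modify_of_contains (d : PySem.Dict Int Int) (k : Int) (f : Int → Int) (h : d.contains k = true) :
    (d.modify k 0 f).keys = d.keys := by
  rw [PySem.Dict.keys_modify]
  exact PySem.Dict.keys_insert_of_contains d _ h

-- B's alpha loop: each occurrence of a present mark adds one.
theorem pv_getD_foldl_guard (marks : List Int) (d : PySem.Dict Int Int) (j : Int) :
    (marks.foldl (fun d m => if d.contains m then d.modify m 0 (· + 1) else d) d).getD j 0
      = d.getD j 0 + (if d.contains j then (marks.count j : Int) else 0) := by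
  induction marks generalizing d with
  | nil => simp
  | cons m ms ih =>
    simp only [List.foldl_cons]
    by_cases hm : d.contains m = true
    · rw [if_pos hm, ih]
      have hck : (d.modify m 0 (· + 1)).contains j = d.contains j := by
        simp only [PySem.Dict.contains_modify]
        rw [Bool.or_eq_right_iff_imp]
        intro h
        rw [eq_of_beq h]; exact hm
      rw [hck, PySem.Dict.getD_modify]
      by_cases hj : j = m
      · subst hj
        simp [hm]
        ring
      · simp [hj, Ne.symm hj]
    · rw [if_neg hm, ih]
      by_cases hj : j = m
      · subst hj
        simp [hm]
      · simp [Ne.symm hj]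

theorem pv_keys_foldl_guard (marks : List Int) (d : PySem.Dict Int Int) :
    (marks.foldl (fun d m => if d.contains m then d.modify m 0 (· + 1) else d) d).keys = d.keys := by
  induction marks generalizing d with
  | nil => rfl
  | cons m ms ih =>
    simp only [List.foldl_cons]
    by_cases hm : d.contains m = true
    · rw [if_pos hm, ih, pv_keys_modify_of_contains _ _ _ hm]
    · rw [if_neg hm, ih]

theorem pv_keys_foldl_modify (l : List Int) (c : Int → Int) (d : PySem.Dict Int Int)
    (hl : ∀ k ∈ l, d.contains k = true) :
    (l.foldl (fun d k => d.modify k 0 (· + c k)) d).keys = d.keys := by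
  induction l generalizing d with
  | nil => rfl
  | cons x xs ih =>
    simp only [List.foldl_cons]
    have hx := hl x (by simp)
    rw [ih]
    · exact pv_keys_modify_of_contains _ _ _ hx
    · intro k hk
      have := hl k (by simp [hk])
      simp only [PySem.Dict.contains_modify]
      simp [this]

-- dict counting loop yields exact multiplicities (via the PySem bridge lemma).
theorem pv_counts_eval (marks : List Int) (k : Int) :
    (marks.foldl (fun d m => d.modify m 0 (· + 1)) PySem.Dict.empty).getD k 0 = (marks.count k : Int) := by
  rw [PySem.Dict.getD_foldl_modify_add_one]
  simp

-- ===== VERDICT (by name: the statement is the Claim_ definition above) =====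
theorem gamma_post_py_spec : Claim_equal_gamma_post_py := by
  intro obs alpha beta _hdom hpre
  obtain ⟨_hobs, _hsub, hnd⟩ := hpre
  unfold Spec_gamma_post_py gamma_post_py gamma_post_py_alt
  dsimp only
  have hsplit := pv_foldl_prod_split ((PySem.Dict.mk alpha).keys)
    (fun (a : PySem.Dict Int Int) (k : Int) => a.modify k 0 (fun x => x + (List.foldl (fun (d : PySem.Dict Int Int) (m : Int) => d.modify m 0 (fun x => x + 1)) PySem.Dict.empty ((PySem.Dict.mk obs).getD "ref_marks" [])).getD k 0))
    (fun (b : PySem.Dict Int Int) (k : Int) => b.modify k 0 (fun x => x + 1))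
    (PySem.Dict.mk alpha) (PySem.Dict.mk beta)
  rw [hsplit]
  set marks : List Int := (PySem.Dict.mk obs).getD "ref_marks" [] with hmarks
  set a0 : PySem.Dict Int Int := PySem.Dict.mk alpha with ha0
  set b0 : PySem.Dict Int Int := PySem.Dict.mk beta with hb0
  have hkeys : a0.keys = alpha.map (·.1) := rfl
  have hndk : a0.keys.Nodup := by rw [hkeys]; exact hnd
  refine Prod.ext ?_ rfl
  -- alpha halves: same keys in the same order, same value at every key
  have hcont : ∀ k ∈ a0.keys, a0.contains k = true := by
    intro k hk
    rw [PySem.Dict.contains_iff_mem_keys]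
    exact hk
  have hAkeys := pv_keys_foldl_modify a0.keys
      (fun k => (marks.foldl (fun d m => d.modify m 0 (· + 1)) PySem.Dict.empty).getD k 0) a0 hcont
  have hBkeys := pv_keys_foldl_guard marks a0
  dsimp only
  rw [PySem.Dict.items_eq_map_keys _ (by rw [hAkeys]; exact hndk) 0,
      PySem.Dict.items_eq_map_keys _ (by rw [hBkeys]; exact hndk) 0,
      hAkeys, hBkeys]
  apply List.map_congr_left
  intro k hk
  rw [pv_getD_foldl_modify_nodup _ _ _ hndk, pv_getD_foldl_guard, pv_counts_eval,
      if_pos hk, if_pos (hcont k hk)]
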